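-- pv_equiv track=rewrite | github.com/joker4002/Enhanced-Coding-Agent-via-Dynamic-Embedding-and-ANN-Search | eval_recall_nl_vs_code_cached.py | pick_code_query
-- ===== SOURCE A (Python) =====
-- def pick_code_query(gold_terms: list[str]) -> str:
--     gold_terms = [t.strip() for t in gold_terms if t.strip()]
--     for t in gold_terms:
--         if "." in t and 3 <= len(t) <= 80:
--             return t
--     for t in gold_terms:
--         if "_" in t and t.islower() and 3 <= len(t) <= 40:
--             return t
--     return gold_terms[0] if gold_terms else ""
-- ===== SOURCE B (Python) =====
-- def pick_code_query(gold_terms: list[str]) -> str: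
--     # One pass: keep the first term seen for each tier, decide at the end.
--     dot = und = first = None
--     for raw in gold_terms:
--         t = raw.strip()
--         if not t:
--             continue
--         if dot is None and "." in t and 3 <= len(t) <= 80:
--             dot = t
--         if und is None and "_" in t and t.islower() and 3 <= len(t) <= 40:
--             und = t
--         if first is None:
--             first = t
--     if dot is not None:
--         return dot
--     if und is not None:
--         return und
--     return first if first is not None else ""
-- ===== Notes on version B (the rewrite author's own statement) =====
-- stated objective: alternative
-- what changed: Replaces A's filter-then-three-priority-passes with a single pass over the raw list that maintains three first-seen holders (dot-tier, underscore-tier, first-overall) and decides the tier after the loop.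
import Mathlib
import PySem

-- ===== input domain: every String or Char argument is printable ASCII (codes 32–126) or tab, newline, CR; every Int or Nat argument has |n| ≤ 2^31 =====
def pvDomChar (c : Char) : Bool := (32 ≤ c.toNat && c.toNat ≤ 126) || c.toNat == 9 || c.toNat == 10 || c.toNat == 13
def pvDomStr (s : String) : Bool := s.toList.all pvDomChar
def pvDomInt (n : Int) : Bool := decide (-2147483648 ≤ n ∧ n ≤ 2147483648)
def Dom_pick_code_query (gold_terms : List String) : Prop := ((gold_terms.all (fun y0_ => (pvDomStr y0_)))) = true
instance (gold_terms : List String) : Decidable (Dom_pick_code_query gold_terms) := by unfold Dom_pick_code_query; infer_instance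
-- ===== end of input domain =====

-- B replaces A's filter-then-three-priority-passes with a single pass keeping three
-- first-seen holders and a tiered decision afterwards (alternative decomposition, same cost).


-- hand port of str.islower() (no PySem primitive): at least one cased char, no uppercase
-- cased char; exact on the ASCII domain (the only cased ASCII chars are a-z / A-Z)
def pvIslower (s : String) : Bool :=
  s.toList.any (fun c => c.isLower) && s.toList.all (fun c => !c.isUpper)

-- ===== PORT A =====
-- first for-loop: return the first term with '.' and length 3..80
def pickLoop1 : List String → Option String
  | [] => none
  | t :: ts =>
    if PySem.Str.isIn "." t ∧ 3 ≤ PySem.Str.len t ∧ PySem.Str.len t ≤ 80 then some t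
    else pickLoop1 ts

-- second for-loop: return the first lowercase term with '_' and length 3..40
def pickLoop2 : List String → Option String
  | [] => none
  | t :: ts =>
    if PySem.Str.isIn "_" t ∧ pvIslower t ∧ 3 ≤ PySem.Str.len t ∧ PySem.Str.len t ≤ 40 then some t
    else pickLoop2 ts

def pick_code_query (gold_terms : List String) : String :=
  let gts := (gold_terms.map PySem.Str.strip).filter (fun t => t ≠ "")
  match pickLoop1 gts with
  | some t => t
  | none =>
    match pickLoop2 gts with
    | some t => t
    | none => match gts with
      | [] => ""
      | t :: _ => t

-- ===== PORT B =====
-- one step of B's single loop over the raw list: three first-seen holders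
def pickStep (acc : Option String × Option String × Option String) (raw : String) :
    Option String × Option String × Option String :=
  let t := PySem.Str.strip raw
  if t = "" then acc
  else
    let (d, u, f) := acc
    let d := if d.isNone ∧ PySem.Str.isIn "." t ∧ 3 ≤ PySem.Str.len t ∧ PySem.Str.len t ≤ 80 then some t else d
    let u := if u.isNone ∧ PySem.Str.isIn "_" t ∧ pvIslower t ∧ 3 ≤ PySem.Str.len t ∧ PySem.Str.len t ≤ 40 then some t else u
    let f := if f.isNone then some t else f
    (d, u, f)

def pick_code_query_alt (gold_terms : List String) : String :=
  match gold_terms.foldl pickStep (none, none, none) with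
  | (some t, _, _) => t
  | (none, some t, _) => t
  | (none, none, f) => f.getD ""

-- ===== PRECONDITION & SPEC =====
def Spec_pick_code_query (gold_terms : List String) (out : String) : Prop := out = pick_code_query_alt gold_terms
instance (gold_terms : List String) (out : String) : Decidable (Spec_pick_code_query gold_terms out) := by unfold Spec_pick_code_query; infer_instance

-- ===== CLAIM (what is proved, stated in full; the proofs are below) =====
def Claim_equal_pick_code_query : Prop := ∀ (gold_terms : List String), Dom_pick_code_query gold_terms → Spec_pick_code_query gold_terms (pick_code_query gold_terms)

-- ===== LEMMAS AND PROOFS =====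

-- the filtered list A iterates over
def pvFilt (L : List String) : List String :=
  (L.map PySem.Str.strip).filter (fun t => t ≠ "")

-- B's fold computes exactly A's three scans of the filtered list (holders never overwritten)
theorem pickStep_fold_spec (L : List String) :
    ∀ d u f : Option String,
      L.foldl pickStep (d, u, f) =
        (d.or (pickLoop1 (pvFilt L)), u.or (pickLoop2 (pvFilt L)), f.or (pvFilt L).head?) := by
  induction L with
  | nil => intro d u f; simp [pvFilt, pickLoop1, pickLoop2]
  | cons r L ih =>
    intro d u f
    by_cases h : PySem.Str.strip r = ""
    · simp [pvFilt, List.foldl_cons, pickStep, h, ih]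
    · simp only [List.foldl_cons, pickStep, h]
      have hfilt : pvFilt (r :: L) = PySem.Str.strip r :: pvFilt L := by
        simp [pvFilt, h]
      rw [ih, hfilt]
      refine Prod.ext ?_ (Prod.ext ?_ ?_) <;>
        cases d <;> cases u <;> cases f <;>
        simp [pickLoop1, pickLoop2, Option.or] <;> split_ifs <;> simp_all

theorem pick_eq (L : List String) : pick_code_query L = pick_code_query_alt L := by
  unfold pick_code_query pick_code_query_alt
  rw [pickStep_fold_spec L none none none]
  show (match pickLoop1 (pvFilt L) with
    | some t => t
    | none => match pickLoop2 (pvFilt L) with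
      | some t => t
      | none => match pvFilt L with | [] => "" | t :: _ => t) = _
  simp only [Option.none_or]
  cases pickLoop1 (pvFilt L) <;> cases h2 : pickLoop2 (pvFilt L) <;> cases hf : pvFilt L <;>
    simp

-- ===== VERDICT (by name: the statement is the Claim_ definition above) =====
theorem pick_code_query_spec : Claim_equal_pick_code_query := by
  intro L _
  unfold Spec_pick_code_query
  exact pick_eq L
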